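-- pv_equiv track=rewrite | github.com/nodejs/node | deps/v8/tools/clusterfuzz/foozzie/v8_suppressions.py | diff_output
-- ===== SOURCE A (Python) =====
-- from itertools import zip_longest
--
-- MAX_LINE_LENGTH = 512
--
-- ORIGINAL_SOURCE_PREFIX = 'v8-foozzie source: '
--
-- SMOKE_TEST_SOURCE = 'foozzie smoke test'
--
-- SMOKE_TEST_END_TOKEN = '___foozzie___smoke_test_end___'
--
-- def short_line_output(line):
--   if len(line) <= MAX_LINE_LENGTH:
--     # Avoid copying.
--     return line
--   return line[0:MAX_LINE_LENGTH] + '...'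
--
-- def diff_output(lines1, lines2):
--   """Returns a tuple (difference, source).
--
--   The difference is None if there's no difference, otherwise a string
--   with a readable diff.
--
--   The source is the last source output within the test case, or None if no
--   such output existed.
--   """
--   # This keeps track where we are in the original source file of the fuzz
--   # test case. We always start with the smoke-test part.
--   source = SMOKE_TEST_SOURCE
--
--   for line1, line2 in zip_longest(lines1, lines2, fillvalue=None):
--
--     # Only one of the two iterators should run out.
--     assert not (line1 is None and line2 is None)
--
--     # One iterator ends earlier.
--     if line1 is None:
--       return f'+ {short_line_output(line2)}', source
--     if line2 is None:
--       return f'- {short_line_output(line1)}', source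
--
--     # Lines are equal.
--     if line1 == line2:
--       # Instrumented original-source-file output must be equal in both
--       # versions. It only makes sense to update it here when both lines
--       # are equal.
--       if source == SMOKE_TEST_SOURCE and line1 == SMOKE_TEST_END_TOKEN:
--         source = None
--       elif line1.startswith(ORIGINAL_SOURCE_PREFIX):
--         source = line1[len(ORIGINAL_SOURCE_PREFIX):]
--       continue
--
--     # Lines are different.
--     short_line1 = short_line_output(line1)
--     short_line2 = short_line_output(line2)
--     return f'- {short_line1}\n+ {short_line2}', source
--
--   # No difference found.
--   return None, source
-- ===== SOURCE B (Python) =====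
-- MAX_LINE_LENGTH = 512
--
-- ORIGINAL_SOURCE_PREFIX = 'v8-foozzie source: '
--
-- SMOKE_TEST_SOURCE = 'foozzie smoke test'
--
-- SMOKE_TEST_END_TOKEN = '___foozzie___smoke_test_end___'
--
--
-- def short_line_output(line):
--   if len(line) <= MAX_LINE_LENGTH:
--     return line
--   return line[0:MAX_LINE_LENGTH] + '...'
--
--
-- def diff_output(lines1, lines2):
--   """Two-pass variant: (1) locate the first differing position, (2) replay
--   the source state machine over the equal prefix only."""
--   # Pass 1: first index where the lists differ (or one runs out).
--   i = 0
--   m = min(len(lines1), len(lines2))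
--   while i < m and lines1[i] == lines2[i]:
--     i += 1
--
--   rest1 = lines1[i:]
--   rest2 = lines2[i:]
--   if rest1 and rest2:
--     diff = f'- {short_line_output(rest1[0])}\n+ {short_line_output(rest2[0])}'
--   elif rest1:
--     diff = f'- {short_line_output(rest1[0])}'
--   elif rest2:
--     diff = f'+ {short_line_output(rest2[0])}'
--   else:
--     diff = None
--
--   # Pass 2: source state machine over the equal prefix.
--   source = SMOKE_TEST_SOURCE
--   for line in lines1[:i]:
--     if source == SMOKE_TEST_SOURCE and line == SMOKE_TEST_END_TOKEN:
--       source = None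
--     elif line.startswith(ORIGINAL_SOURCE_PREFIX):
--       source = line[len(ORIGINAL_SOURCE_PREFIX):]
--   return diff, source
-- ===== Notes on version B (the rewrite author's own statement) =====
-- stated objective: alternative
-- what changed: A interleaves diff detection and source tracking in one zip_longest loop; B first scans for the first differing index and builds the diff from the suffixes there, then replays the source state machine in a separate fold over only the equal prefix of lines1.
import Mathlib
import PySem

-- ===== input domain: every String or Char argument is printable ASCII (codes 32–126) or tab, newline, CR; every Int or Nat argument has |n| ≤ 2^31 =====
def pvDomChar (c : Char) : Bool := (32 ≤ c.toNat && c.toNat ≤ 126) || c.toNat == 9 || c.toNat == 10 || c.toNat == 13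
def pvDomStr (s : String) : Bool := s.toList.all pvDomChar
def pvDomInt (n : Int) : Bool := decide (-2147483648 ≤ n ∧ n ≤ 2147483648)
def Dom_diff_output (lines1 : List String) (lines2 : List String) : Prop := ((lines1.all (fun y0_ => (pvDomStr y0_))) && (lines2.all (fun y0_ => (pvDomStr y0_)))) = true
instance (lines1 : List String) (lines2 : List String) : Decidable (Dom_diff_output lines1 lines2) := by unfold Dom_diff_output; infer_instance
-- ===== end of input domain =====

-- B reorganises A: a first pass finds the first differing index, a second pass
-- replays the source state machine over only the equal prefix (objective: alternative decomposition).

-- ===== PORT A =====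
-- shared module helper short_line_output (identical in Source A and Source B)
def short_line_output (line : String) : String :=
  if PySem.Str.len line ≤ 512 then line
  else PySem.Str.slice line (some 0) (some 512) ++ "..."

-- the for-loop over zip_longest, carried state = source (None modelled as Option)
def diffLoopA : List String → List String → Option String → Option String × Option String
  | [], [], source => (none, source)
  | [], line2 :: _, source => (some ("+ " ++ short_line_output line2), source)
  | line1 :: _, [], source => (some ("- " ++ short_line_output line1), source)
  | line1 :: rest1, line2 :: rest2, source =>
    if line1 = line2 then
      let source' :=
        if source = some "foozzie smoke test" ∧ line1 = "___foozzie___smoke_test_end___" then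
          none
        else if PySem.Str.startswith line1 "v8-foozzie source: " then
          some (PySem.Str.slice line1 (some 19) none)
        else source
      diffLoopA rest1 rest2 source'
    else
      (some ("- " ++ short_line_output line1 ++ "\n+ " ++ short_line_output line2), source)

def diff_output (lines1 : List String) (lines2 : List String) : Option String × Option String :=
  diffLoopA lines1 lines2 (some "foozzie smoke test")

-- ===== PORT B =====
-- pass 1: the while loop locating the first index where the lists differ or one ends
def firstDiffIdx : List String → List String → Nat
  | line1 :: rest1, line2 :: rest2 =>
    if line1 = line2 then firstDiffIdx rest1 rest2 + 1 else 0
  | _, _ => 0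

-- body of the pass-2 for loop: one step of the source state machine
def sourceStep (source : Option String) (line : String) : Option String :=
  if source = some "foozzie smoke test" ∧ line = "___foozzie___smoke_test_end___" then none
  else if PySem.Str.startswith line "v8-foozzie source: " then
    some (PySem.Str.slice line (some 19) none)
  else source

def diff_output_alt (lines1 : List String) (lines2 : List String) : Option String × Option String :=
  let i := firstDiffIdx lines1 lines2
  let diff : Option String :=
    match lines1.drop i, lines2.drop i with
    | line1 :: _, line2 :: _ =>
      some ("- " ++ short_line_output line1 ++ "\n+ " ++ short_line_output line2)
    | line1 :: _, [] => some ("- " ++ short_line_output line1)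
    | [], line2 :: _ => some ("+ " ++ short_line_output line2)
    | [], [] => none
  let source := (lines1.take i).foldl sourceStep (some "foozzie smoke test")
  (diff, source)

-- ===== PRECONDITION & SPEC =====
def Spec_diff_output (lines1 : List String) (lines2 : List String) (out : Option String × Option String) : Prop := out = diff_output_alt lines1 lines2
instance (lines1 : List String) (lines2 : List String) (out : Option String × Option String) : Decidable (Spec_diff_output lines1 lines2 out) := by unfold Spec_diff_output; infer_instance

-- ===== CLAIM (what is proved, stated in full; the proofs are below) =====
def Claim_equal_diff_output : Prop := ∀ (lines1 : List String) (lines2 : List String), Dom_diff_output lines1 lines2 → Spec_diff_output lines1 lines2 (diff_output lines1 lines2)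

-- ===== LEMMAS AND PROOFS =====

-- the loop of A, started from any source state, equals B's two passes from that state
theorem diffLoopA_eq (lines1 lines2 : List String) (s : Option String) :
    diffLoopA lines1 lines2 s =
      ((match lines1.drop (firstDiffIdx lines1 lines2), lines2.drop (firstDiffIdx lines1 lines2) with
        | line1 :: _, line2 :: _ =>
          some ("- " ++ short_line_output line1 ++ "\n+ " ++ short_line_output line2)
        | line1 :: _, [] => some ("- " ++ short_line_output line1)
        | [], line2 :: _ => some ("+ " ++ short_line_output line2)
        | [], [] => none),
       (lines1.take (firstDiffIdx lines1 lines2)).foldl sourceStep s) := by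
  induction lines1 generalizing lines2 s with
  | nil =>
    cases lines2 <;> simp [diffLoopA, firstDiffIdx]
  | cons line1 rest1 ih =>
    cases lines2 with
    | nil => simp [diffLoopA, firstDiffIdx]
    | cons line2 rest2 =>
      by_cases h : line1 = line2
      · simp only [diffLoopA, firstDiffIdx, if_pos h, List.drop_succ_cons, List.take_succ_cons,
          List.foldl_cons]
        exact ih rest2 (sourceStep s line1)
      · simp [diffLoopA, firstDiffIdx, h]

-- ===== VERDICT (by name: the statement is the Claim_ definition above) =====
theorem diff_output_spec : Claim_equal_diff_output := by
  intro lines1 lines2 _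
  show diff_output lines1 lines2 = diff_output_alt lines1 lines2
  simpa [diff_output_alt] using diffLoopA_eq lines1 lines2 (some "foozzie smoke test")
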